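-- pv_equiv track=rewrite | github.com/avikj/L4DC-MPC-OCD | interact_drive/reward_design/coarse_value_iteration.py | _coords_from_disc_grid
-- ===== SOURCE A (Python) =====
-- def _coords_from_disc_grid(disc_grid):
--     """Given a list of values for each dimension, returns all possible combinations of values,
--         in a dictionary mapping index to coordinate value.
--         i.e. disc_grid = [[1,2], [3,4,5]] -> [(0,0): (1,3), (0,1): (1,4), (0,2): (1,5),
--                                 (1,0): (2,3), (1,1): (2,4), (1,2): (2,5)]
--     """
--     inds = [[]]
--     coords = [[]]
--     for dim in range(len(disc_grid)): # iteratively add all values along a given dimension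
--         expanded_coords = []
--         expanded_inds = []
--         for partial_ind, partial_coord in zip(inds, coords):
--             for i, dim_val in enumerate(disc_grid[dim]):
--                 expanded_coords.append(partial_coord+[dim_val])
--                 expanded_inds.append(partial_ind+[i])
--         inds = expanded_inds
--         coords = expanded_coords
--
--     return {tuple(i): tuple(c) for i, c in zip(inds, coords)}
-- ===== SOURCE B (Python) =====
-- def _coords_from_disc_grid(disc_grid):
--     """Mixed-radix enumeration: decode each flat index n into a per-dimension
--     index tuple via repeated divmod, then look up the coordinate values."""
--     total = 1
--     for dim in disc_grid:
--         total *= len(dim)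
--     result = {}
--     for n in range(total):
--         rem = n
--         rev_idx = []
--         for dim in reversed(disc_grid):
--             rem, i = divmod(rem, len(dim))
--             rev_idx.append(i)
--         idx = tuple(reversed(rev_idx))
--         result[idx] = tuple(dim[i] for dim, i in zip(disc_grid, idx))
--     return result
-- ===== Notes on version B (the rewrite author's own statement) =====
-- stated objective: alternative
-- what changed: Replaces A's iterative per-dimension expansion of parallel inds/coords lists with a mixed-radix enumeration: compute total = product of dimension sizes and decode each flat index n in range(total) into its index tuple by repeated divmod, looking coordinates up directly.
import Mathlib
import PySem

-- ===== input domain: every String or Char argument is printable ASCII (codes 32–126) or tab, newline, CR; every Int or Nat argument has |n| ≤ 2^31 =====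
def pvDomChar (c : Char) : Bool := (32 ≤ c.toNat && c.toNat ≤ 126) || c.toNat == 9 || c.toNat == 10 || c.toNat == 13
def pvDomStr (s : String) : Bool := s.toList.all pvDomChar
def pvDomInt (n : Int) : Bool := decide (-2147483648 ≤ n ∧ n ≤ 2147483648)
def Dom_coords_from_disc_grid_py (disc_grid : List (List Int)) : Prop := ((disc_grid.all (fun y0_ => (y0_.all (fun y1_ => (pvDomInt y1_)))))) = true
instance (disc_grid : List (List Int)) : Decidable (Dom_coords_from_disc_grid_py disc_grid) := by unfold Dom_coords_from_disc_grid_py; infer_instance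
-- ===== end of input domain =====

-- B replaces A's iterative per-dimension list expansion with a mixed-radix (divmod) decoding
-- of each flat index in range(total); objective: alternative algorithm of similar cost.

-- ===== PORT A =====
-- Port of A: iterative per-dimension expansion of (inds, coords), then dict build.
def coords_from_disc_grid_py (disc_grid : List (List Int)) : List (List Int × List Int) :=
  let st := (PySem.List.pyRange 0 (disc_grid.length : Int) 1).foldl
    (fun (st : List (List Int) × List (List Int)) dim =>
      -- disc_grid[dim]: the index is always in range here, pyGetD is exact
      let d := PySem.List.pyGetD disc_grid dim []
      (st.1.zip st.2).foldl
        (fun (ex : List (List Int) × List (List Int)) pc =>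
          (PySem.List.enumerate d 0).foldl
            (fun ex iv => (ex.1 ++ [pc.1 ++ [iv.1]], ex.2 ++ [pc.2 ++ [iv.2]]))
            ex)
        ([], []))
    ([[]], [[]])
  ((st.1.zip st.2).foldl
    (fun (res : PySem.Dict (List Int) (List Int)) ic => res.insert ic.1 ic.2)
    PySem.Dict.empty).items

-- ===== PORT B =====
-- Port of B: mixed-radix decoding of each flat index n in range(total).
def coords_from_disc_grid_py_alt (disc_grid : List (List Int)) : List (List Int × List Int) :=
  let total : Int := disc_grid.foldl (fun t dim => t * (dim.length : Int)) 1
  ((PySem.List.pyRange 0 total 1).foldl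
    (fun (res : PySem.Dict (List Int) (List Int)) n =>
      -- rem, i = divmod(rem, len(dim)): len(dim) > 0 whenever this loop body runs
      let st := disc_grid.reverse.foldl
        (fun (p : Int × List Int) dim =>
          (PySem.Int.floordiv p.1 (dim.length : Int),
           p.2 ++ [PySem.Int.mod p.1 (dim.length : Int)]))
        (n, [])
      let idx := st.2.reverse
      -- dim[i]: i is always in range here, pyGetD is exact
      res.insert idx ((disc_grid.zip idx).map (fun di => PySem.List.pyGetD di.1 di.2 0)))
    PySem.Dict.empty).items

-- ===== PRECONDITION & SPEC =====
def Spec_coords_from_disc_grid_py (disc_grid : List (List Int)) (out : List (List Int × List Int)) : Prop := out = coords_from_disc_grid_py_alt disc_grid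
instance (disc_grid : List (List Int)) (out : List (List Int × List Int)) : Decidable (Spec_coords_from_disc_grid_py disc_grid out) := by unfold Spec_coords_from_disc_grid_py; infer_instance

-- ===== CLAIM (what is proved, stated in full; the proofs are below) =====
def Claim_equal_coords_from_disc_grid_py : Prop := ∀ (disc_grid : List (List Int)), Dom_coords_from_disc_grid_py disc_grid → Spec_coords_from_disc_grid_py disc_grid (coords_from_disc_grid_py disc_grid)



-- ===== LEMMAS AND PROOFS =====

-- total number of grid points
def pvT (ds : List (List Int)) : Nat := ds.foldr (fun d acc => d.length * acc) 1

-- the cartesian product, structurally recursive on the dimensions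
def pvCart : List (List Int) → List (List Int × List Int)
  | [] => [([], [])]
  | d :: ds =>
    (PySem.List.enumerate d 0).flatMap
      (fun iv => (pvCart ds).map (fun p => (iv.1 :: p.1, iv.2 :: p.2)))

-- mixed-radix decoding of a flat index
def pvDec : List (List Int) → Nat → List Int × List Int
  | [], _ => ([], [])
  | d :: ds, n =>
    ((((n / pvT ds) % d.length : Nat) : Int) :: (pvDec ds (n % pvT ds)).1,
      d.getD ((n / pvT ds) % d.length) 0 :: (pvDec ds (n % pvT ds)).2)

-- A's one-dimension expansion step, as a flatMap on the list of pairs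
def pvExpand (P : List (List Int × List Int)) (d : List Int) : List (List Int × List Int) :=
  P.flatMap (fun p => (PySem.List.enumerate d 0).map (fun iv => (p.1 ++ [iv.1], p.2 ++ [iv.2])))

-- A's step on the (inds, coords) pair of lists (the port's inner two loops)
def pvStepA (st : List (List Int) × List (List Int)) (d : List Int) :
    List (List Int) × List (List Int) :=
  (st.1.zip st.2).foldl
    (fun (ex : List (List Int) × List (List Int)) pc =>
      (PySem.List.enumerate d 0).foldl
        (fun ex iv => (ex.1 ++ [pc.1 ++ [iv.1]], ex.2 ++ [pc.2 ++ [iv.2]]))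
        ex)
    ([], [])

-- B's loop body for one flat index n
def pvLoopB (ds : List (List Int)) (n : Int) : Int × List Int :=
  ds.reverse.foldl
    (fun (p : Int × List Int) dim =>
      (PySem.Int.floordiv p.1 (dim.length : Int),
       p.2 ++ [PySem.Int.mod p.1 (dim.length : Int)]))
    (n, [])

def pvStepB (ds : List (List Int)) (res : PySem.Dict (List Int) (List Int)) (n : Int) :
    PySem.Dict (List Int) (List Int) :=
  res.insert (pvLoopB ds n).2.reverse
    ((ds.zip (pvLoopB ds n).2.reverse).map (fun di => PySem.List.pyGetD di.1 di.2 0))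

-- closed form of B's divmod loop digits, before the final reverse
def pvRevIdx : List (List Int) → Nat → List Int
  | [], _ => []
  | d :: ds, n => pvRevIdx ds n ++ [(((n / pvT ds) % d.length : Nat) : Int)]

def pvIdxOf : List (List Int) → Nat → List Int
  | [], _ => []
  | d :: ds, n => (((n / pvT ds) % d.length : Nat) : Int) :: pvIdxOf ds n

theorem pv_pair_fold {α β : Type} (l : List α) (f g : α → β)
    (ab : List β × List β) :
    l.foldl (fun ex x => (ex.1 ++ [f x], ex.2 ++ [g x])) ab
      = (ab.1 ++ l.map f, ab.2 ++ l.map g) := by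
  induction l generalizing ab with
  | nil => simp
  | cons x t ih => simp [ih]

theorem pv_pair_fold2 {α β : Type} (l : List α) (F G : α → List β)
    (ab : List β × List β) :
    l.foldl (fun ex x => (ex.1 ++ F x, ex.2 ++ G x)) ab
      = (ab.1 ++ l.flatMap F, ab.2 ++ l.flatMap G) := by
  induction l generalizing ab with
  | nil => simp
  | cons x t ih => simp [ih]

theorem pv_stepA_eq (P : List (List Int × List Int)) (d : List Int) :
    pvStepA (P.map Prod.fst, P.map Prod.snd) d
      = ((pvExpand P d).map Prod.fst, (pvExpand P d).map Prod.snd) := by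
  unfold pvStepA
  rw [List.zip_map']
  simp only [Prod.mk.eta, List.map_id_fun', id_eq, pv_pair_fold]
  rw [pv_pair_fold2]
  simp [pvExpand, List.map_flatMap, List.map_map, Function.comp_def]

theorem pv_foldA_eq (ds : List (List Int)) (P : List (List Int × List Int)) :
    ds.foldl pvStepA (P.map Prod.fst, P.map Prod.snd)
      = ((ds.foldl pvExpand P).map Prod.fst, (ds.foldl pvExpand P).map Prod.snd) := by
  induction ds generalizing P with
  | nil => rfl
  | cons d t ih => simp only [List.foldl_cons, pv_stepA_eq, ih]

theorem pv_foldExpand_eq (ds : List (List Int)) (P : List (List Int × List Int)) :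
    ds.foldl pvExpand P
      = P.flatMap (fun p => (pvCart ds).map (fun q => (p.1 ++ q.1, p.2 ++ q.2))) := by
  induction ds generalizing P with
  | nil => simp [pvCart]
  | cons d t ih =>
    simp only [List.foldl_cons, ih, pvCart, pvExpand]
    simp only [List.flatMap_assoc, List.map_flatMap, List.flatMap_map, List.map_map]
    apply List.flatMap_congr
    intro p _
    apply List.flatMap_congr
    intro iv _
    simp [Function.comp_def]

theorem pv_range_mul (a b : Nat) :
    List.range (a * b)
      = (List.range a).flatMap (fun j => (List.range b).map (fun k => j * b + k)) := by
  induction a with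
  | zero => simp
  | succ a ih =>
    rw [Nat.succ_mul, List.range_add, ih, List.range_succ, List.flatMap_append]
    simp [Nat.add_comm]

theorem pv_enumerate_eq (d : List Int) :
    PySem.List.enumerate d 0
      = (List.range d.length).map (fun (j : Nat) => ((j : Int), d.getD j 0)) := by
  rw [PySem.List.enumerate_eq_map_pyRange d 0]
  simp [PySem.List.len_eq, PySem.List.pyRange_zero_nat, List.map_map, Function.comp_def]

theorem pv_cart_eq (ds : List (List Int)) :
    pvCart ds = (List.range (pvT ds)).map (pvDec ds) := by
  induction ds with
  | nil => simp [pvCart, pvT, pvDec, List.range_one]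
  | cons d t ih =>
    rcases Nat.eq_zero_or_pos (pvT t) with h0 | hpos
    · rw [show pvT (d :: t) = d.length * pvT t from rfl, h0, Nat.mul_zero]
      simp [pvCart, ih, h0]
    · rw [show pvT (d :: t) = d.length * pvT t from rfl, pv_range_mul]
      rw [pvCart, ih, pv_enumerate_eq, List.flatMap_map, List.map_flatMap]
      apply List.flatMap_congr
      intro j hj
      rw [List.map_map, List.map_map]
      apply List.map_congr_left
      intro k hk
      simp only [List.mem_range] at hj hk
      simp only [Function.comp_def, pvDec]
      rw [Nat.mul_comm j (pvT t), Nat.mul_add_div hpos, Nat.div_eq_of_lt hk,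
        Nat.add_zero, Nat.mod_eq_of_lt hj, Nat.mul_add_mod, Nat.mod_eq_of_lt hk]

theorem pv_loop_eq (ds : List (List Int)) (n : Nat) :
    ds.reverse.foldl
      (fun (p : Int × List Int) dim =>
        (PySem.Int.floordiv p.1 (dim.length : Int),
         p.2 ++ [PySem.Int.mod p.1 (dim.length : Int)]))
      ((n : Int), ([] : List Int))
      = ((((n / pvT ds : Nat)) : Int), pvRevIdx ds n) := by
  induction ds with
  | nil => simp [pvT, pvRevIdx]
  | cons d t ih =>
    simp only [List.reverse_cons, List.foldl_append, List.foldl_cons, List.foldl_nil,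
      ih, pvRevIdx]
    rw [PySem.Int.floordiv_natCast, PySem.Int.mod_natCast,
      Nat.div_div_eq_div_mul, Nat.mul_comm (pvT t) d.length]
    rfl

theorem pv_revIdx_reverse (ds : List (List Int)) (n : Nat) :
    (pvRevIdx ds n).reverse = pvIdxOf ds n := by
  induction ds with
  | nil => rfl
  | cons d t ih => simp [pvRevIdx, pvIdxOf, ih]

theorem pv_idxOf_eq (ds : List (List Int)) (n : Nat) :
    pvIdxOf ds n = (pvDec ds (n % pvT ds)).1 := by
  induction ds generalizing n with
  | nil => rfl
  | cons d t ih =>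
    simp only [pvIdxOf, pvDec]
    rw [show pvT (d :: t) = d.length * pvT t from rfl,
      Nat.mul_comm d.length (pvT t), Nat.mod_mul_right_div_self,
      Nat.mod_mod_of_dvd _ dvd_rfl,
      Nat.mod_mod_of_dvd n (dvd_mul_right (pvT t) d.length), ih n]

theorem pv_coords_eq (ds : List (List Int)) (n : Nat) :
    (ds.zip (pvDec ds n).1).map (fun di => PySem.List.pyGetD di.1 di.2 0)
      = (pvDec ds n).2 := by
  induction ds generalizing n with
  | nil => rfl
  | cons d t ih =>
    simp only [pvDec, List.zip_cons_cons, List.map_cons, ih,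
      PySem.List.pyGetD_natCast]

theorem pv_total_eq (ds : List (List Int)) (a : Int) :
    ds.foldl (fun t d => t * (d.length : Int)) a = a * ((pvT ds : Nat) : Int) := by
  induction ds generalizing a with
  | nil => simp [pvT]
  | cons d t ih =>
    simp only [List.foldl_cons, ih, pvT, List.foldr_cons]
    push_cast
    ring

theorem pv_B_eq (ds : List (List Int)) :
    coords_from_disc_grid_py_alt ds
      = (((List.range (pvT ds)).map (pvDec ds)).foldl
          (fun (res : PySem.Dict (List Int) (List Int)) ic => res.insert ic.1 ic.2)
          PySem.Dict.empty).items := by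
  have hB : coords_from_disc_grid_py_alt ds
      = ((PySem.List.pyRange 0 (ds.foldl (fun t dim => t * (dim.length : Int)) 1) 1).foldl
          (pvStepB ds) PySem.Dict.empty).items := rfl
  rw [hB, pv_total_eq, one_mul, PySem.List.pyRange_zero_nat, List.foldl_map, List.foldl_map]
  congr 1
  apply List.foldl_ext
  intro res n hn
  have hlt : n < pvT ds := List.mem_range.mp hn
  show pvStepB ds res (n : Int) = res.insert (pvDec ds n).1 (pvDec ds n).2
  unfold pvStepB pvLoopB
  rw [pv_loop_eq, pv_revIdx_reverse, pv_idxOf_eq, Nat.mod_eq_of_lt hlt, pv_coords_eq]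

theorem pv_A_eq (ds : List (List Int)) :
    coords_from_disc_grid_py ds
      = ((pvCart ds).foldl
          (fun (res : PySem.Dict (List Int) (List Int)) ic => res.insert ic.1 ic.2)
          PySem.Dict.empty).items := by
  have hA : coords_from_disc_grid_py ds
      = (((fun st : List (List Int) × List (List Int) =>
            ((st.1.zip st.2).foldl
              (fun (res : PySem.Dict (List Int) (List Int)) ic => res.insert ic.1 ic.2)
              PySem.Dict.empty).items)
          ((PySem.List.pyRange 0 (ds.length : Int) 1).foldl
            (fun acc j => pvStepA acc (PySem.List.pyGetD ds j []))
            ([[]], [[]])))) := rfl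
  rw [hA, PySem.List.foldl_pyRange_zero_pyGetD' ds [] pvStepA ([[]], [[]])]
  rw [show (([[]], [[]]) : List (List Int) × List (List Int))
        = (([(([] : List Int), ([] : List Int))]).map Prod.fst,
           ([(([] : List Int), ([] : List Int))]).map Prod.snd) from rfl,
    pv_foldA_eq, pv_foldExpand_eq]
  simp only [List.flatMap_cons, List.flatMap_nil, List.nil_append, List.append_nil]
  rw [List.zip_map']
  simp

theorem pv_AB (ds : List (List Int)) :
    coords_from_disc_grid_py ds = coords_from_disc_grid_py_alt ds := by
  rw [pv_A_eq, pv_B_eq, pv_cart_eq]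

-- ===== VERDICT (by name: the statement is the Claim_ definition above) =====
theorem coords_from_disc_grid_py_spec : Claim_equal_coords_from_disc_grid_py := by
  intro ds _
  unfold Spec_coords_from_disc_grid_py
  exact pv_AB ds
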